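-- pv_equiv track=rewrite | github.com/matthewromer/RP_moral_weight_and_sentience | wr_model.py | get_human_sum
-- ===== SOURCE A (Python) =====
-- def get_human_sum(model_name, model_proxies, hc_proxies, HC_WEIGHT):
--     human_sum = 0
--
--     for proxy in model_proxies:
--         if model_name in {"High-Confidence (Simple Scoring)", "High-Confidence (Cubic)"}:
--             human_sum += 1
--         else:
--             if proxy in hc_proxies:
--                 human_sum += HC_WEIGHT
--             else:
--                 human_sum += 1
--     return human_sum
-- ===== SOURCE B (Python) =====
-- def get_human_sum(model_name, model_proxies, hc_proxies, HC_WEIGHT):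
--     n = len(model_proxies)
--     if model_name in ("High-Confidence (Simple Scoring)", "High-Confidence (Cubic)"):
--         return n
--     counts = {}
--     for p in model_proxies:
--         counts[p] = counts.get(p, 0) + 1
--     hc_set = set(hc_proxies)
--     return n + (HC_WEIGHT - 1) * sum(c for p, c in counts.items() if p in hc_set)
-- ===== Notes on version B (the rewrite author's own statement) =====
-- stated objective: alternative
-- what changed: Replaces A's per-element branching loop by a staged algorithm: a histogram dict of model_proxies and a hash set of hc_proxies are built once, the overlap is a multiplicity-weighted sum over the DISTINCT keys of the histogram, and the result is the closed form n + (HC_WEIGHT-1)*overlap; A's inner list scan per element disappears.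
import Mathlib
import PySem

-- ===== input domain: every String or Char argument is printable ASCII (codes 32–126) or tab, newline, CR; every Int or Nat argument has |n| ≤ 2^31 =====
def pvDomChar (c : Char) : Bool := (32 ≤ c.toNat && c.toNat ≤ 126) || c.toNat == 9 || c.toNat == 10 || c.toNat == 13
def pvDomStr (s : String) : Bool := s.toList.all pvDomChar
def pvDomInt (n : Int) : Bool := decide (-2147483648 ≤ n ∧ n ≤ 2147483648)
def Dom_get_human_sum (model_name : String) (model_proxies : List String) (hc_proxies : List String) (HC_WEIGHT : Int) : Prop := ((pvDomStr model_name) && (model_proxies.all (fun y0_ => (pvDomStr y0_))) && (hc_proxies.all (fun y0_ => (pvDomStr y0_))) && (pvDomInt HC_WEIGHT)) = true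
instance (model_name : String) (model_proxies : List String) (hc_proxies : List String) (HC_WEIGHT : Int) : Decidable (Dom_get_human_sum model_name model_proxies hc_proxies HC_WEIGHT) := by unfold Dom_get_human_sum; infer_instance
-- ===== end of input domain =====

-- B restructures A's per-element branching loop into staged passes: a histogram
-- dict of model_proxies, a set of hc_proxies, a multiplicity-weighted overlap sum
-- over the distinct keys, combined as n + (HC_WEIGHT-1)*overlap (objective: alternative).

-- ===== PORT A =====
def get_human_sum (model_name : String) (model_proxies : List String) (hc_proxies : List String) (HC_WEIGHT : Int) : Int :=
  model_proxies.foldl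
    (fun human_sum proxy =>
      if model_name = "High-Confidence (Simple Scoring)" ∨ model_name = "High-Confidence (Cubic)" then
        human_sum + 1
      else if hc_proxies.contains proxy then
        human_sum + HC_WEIGHT
      else
        human_sum + 1) 0

-- ===== PORT B =====
def get_human_sum_alt (model_name : String) (model_proxies : List String) (hc_proxies : List String) (HC_WEIGHT : Int) : Int :=
  let n : Int := model_proxies.length
  if model_name = "High-Confidence (Simple Scoring)" ∨ model_name = "High-Confidence (Cubic)" then
    n
  else
    let counts : PySem.Dict String Int :=
      model_proxies.foldl (fun d p => d.insert p (d.getD p 0 + 1)) PySem.Dict.empty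
    let hc_set : PySem.Set String := PySem.Set.ofList hc_proxies
    n + (HC_WEIGHT - 1) *
      ((counts.items.filter (fun pc => hc_set.contains pc.1)).map (fun pc => pc.2)).sum

-- ===== PRECONDITION & SPEC =====
def Spec_get_human_sum (model_name : String) (model_proxies : List String) (hc_proxies : List String) (HC_WEIGHT : Int) (out : Int) : Prop := out = get_human_sum_alt model_name model_proxies hc_proxies HC_WEIGHT
instance (model_name : String) (model_proxies : List String) (hc_proxies : List String) (HC_WEIGHT : Int) (out : Int) : Decidable (Spec_get_human_sum model_name model_proxies hc_proxies HC_WEIGHT out) := by unfold Spec_get_human_sum; infer_instance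

-- ===== CLAIM (what is proved, stated in full; the proofs are below) =====
def Claim_equal_get_human_sum : Prop := ∀ (model_name : String) (model_proxies : List String) (hc_proxies : List String) (HC_WEIGHT : Int), Dom_get_human_sum model_name model_proxies hc_proxies HC_WEIGHT → Spec_get_human_sum model_name model_proxies hc_proxies HC_WEIGHT (get_human_sum model_name model_proxies hc_proxies HC_WEIGHT)

-- ===== LEMMAS AND PROOFS =====

-- A's loop, in closed form: length plus (HC_WEIGHT-1) per element that hits hc_proxies.
theorem foldl_hsum (model_name : String) (hc_proxies : List String) (HC_WEIGHT : Int)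
    (ps : List String) (s : Int) :
    ps.foldl
      (fun human_sum proxy =>
        if model_name = "High-Confidence (Simple Scoring)" ∨ model_name = "High-Confidence (Cubic)" then
          human_sum + 1
        else if hc_proxies.contains proxy then
          human_sum + HC_WEIGHT
        else
          human_sum + 1) s =
    s + (if model_name = "High-Confidence (Simple Scoring)" ∨ model_name = "High-Confidence (Cubic)" then
          (ps.length : Int)
        else
          (ps.length : Int) + (HC_WEIGHT - 1) * ((ps.filter (fun p => hc_proxies.contains p)).length : Int)) := by
  induction ps generalizing s with
  | nil => simp
  | cons p t ih =>
    simp only [List.foldl_cons, ih, List.length_cons, List.filter_cons]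
    by_cases h1 : model_name = "High-Confidence (Simple Scoring)" ∨ model_name = "High-Confidence (Cubic)"
    · simp only [if_pos h1]; push_cast; ring
    · simp only [if_neg h1]
      by_cases h2 : p ∈ hc_proxies
      · simp [h2]; ring
      · simp [h2]; ring

-- B's overlap sum over the histogram's distinct keys equals the number of elements
-- of ps that lie in hc_proxies.
theorem overlap_eq (hc_proxies : List String) (ps : List String) :
    ((((ps.foldl (fun d p => d.insert p (d.getD p 0 + 1)) PySem.Dict.empty).items.filter
        (fun pc => (PySem.Set.ofList hc_proxies).contains pc.1)).map (fun pc => pc.2)).sum)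
    = ((ps.filter (fun p => hc_proxies.contains p)).length : Int) := by
  rw [PySem.Dict.foldl_insert_getD_add_one_eq_counter, PySem.Dict.items_counter]
  rw [List.filter_map, List.map_map]
  have hperm : (PySem.Set.ofList ps).Perm ps.dedup := by
    rw [List.perm_ext_iff_of_nodup (PySem.Set.nodup_ofList ps) ps.nodup_dedup]
    intro a; rw [PySem.Set.mem_ofList, List.mem_dedup]
  have hpred : ∀ x : String,
      ((fun pc : String × Int => (PySem.Set.ofList hc_proxies).contains pc.1) ∘
        (fun k => (k, (ps.count k : Int)))) x = hc_proxies.contains x := by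
    intro x
    simp [Function.comp, PySem.Set.mem_ofList, List.contains_eq_mem]
  calc ((List.filter _ (PySem.Set.ofList ps)).map _).sum
      = (((PySem.Set.ofList ps).filter (fun k => hc_proxies.contains k)).map
          (fun k => (ps.count k : Int))).sum := by
        rw [List.filter_congr (fun x _ => hpred x)]; rfl
    _ = ((ps.dedup.filter (fun k => hc_proxies.contains k)).map
          (fun k => (ps.count k : Int))).sum :=
        ((hperm.filter _).map _).sum_eq
    _ = (((ps.dedup.filter (fun k => hc_proxies.contains k)).map
          (fun k => ps.count k)).sum : Nat) := by
        rw [Nat.cast_list_sum, List.map_map]; rfl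
    _ = ((ps.filter (fun p => hc_proxies.contains p)).length : Int) := by
        rw [List.sum_map_count_dedup_filter_eq_countP, List.countP_eq_length_filter]

-- ===== VERDICT (by name: the statement is the Claim_ definition above) =====
theorem get_human_sum_spec : Claim_equal_get_human_sum := by
  intro mn ps hc w _
  unfold Spec_get_human_sum get_human_sum get_human_sum_alt
  rw [foldl_hsum]
  by_cases h1 : mn = "High-Confidence (Simple Scoring)" ∨ mn = "High-Confidence (Cubic)"
  · simp [h1]
  · simp only [if_neg h1, zero_add]
    rw [overlap_eq]
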